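-- pv_equiv track=rewrite | github.com/adamsih300u/bastion | backend/mcp/tools/calibre_book_analysis_tool.py | _create_llm_segments
-- ===== SOURCE A (Python) =====
-- from typing import List, Dict, Any, Optional
--
-- def _create_llm_segments(content: str, segment_size: int, overlap: int, break_at_sentences: bool = True) -> List[str]:
--     """Create LLM-friendly content segments with sentence-aware breaking"""
--     if not content:
--         return []
--
--     segments = []
--     start = 0
--
--     while start < len(content):
--         # Calculate segment end
--         end = start + segment_size
--
--         # If this isn't the last segment and we want sentence-aware breaks
--         if end < len(content) and break_at_sentences:
--             # Look for sentence endings within the last 100 characters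
--             search_start = max(start + segment_size - 100, start)
--             search_end = min(end + 50, len(content))
--
--             # Find the last sentence ending in this range
--             for i in range(search_end - 1, search_start - 1, -1):
--                 if content[i] in '.!?':
--                     end = i + 1
--                     break
--
--         # Extract the segment
--         segment = content[start:end].strip()
--         if segment:
--             segments.append(segment)
--
--         # Move start position for next segment (with overlap)
--         start = max(start + 1, end - overlap)
--
--         # Safety check to prevent infinite loops
--         if start >= len(content):
--             break
--
--     return segments
-- ===== SOURCE B (Python) =====
-- from typing import List
--
--
-- def _create_llm_segments(content: str, segment_size: int, overlap: int, break_at_sentences: bool = True) -> List[str]: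
--     """Create LLM-friendly content segments with sentence-aware breaking.
--
--     Different decomposition: one pass collects the sorted positions of all
--     sentence-ending characters; each segment then finds its break point by a
--     hand-written binary search over that index instead of A's backward scan.
--     """
--     n = len(content)
--     bounds = [i for i, ch in enumerate(content) if ch in '.!?']
--
--     def seg_end(start):
--         end = start + segment_size
--         if end < n and break_at_sentences:
--             ss = max(end - 100, start)
--             se = min(end + 50, n)
--             # rightmost boundary position < se, by binary search
--             lo, hi = 0, len(bounds)
--             while lo < hi:
--                 mid = (lo + hi) // 2
--                 if bounds[mid] < se:
--                     lo = mid + 1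
--                 else:
--                     hi = mid
--             if lo > 0 and bounds[lo - 1] >= ss:
--                 end = bounds[lo - 1] + 1
--         return end
--
--     segments = []
--     start = 0
--     while start < n:
--         end = seg_end(start)
--         piece = content[start:end].strip()
--         if piece:
--             segments.append(piece)
--         start = max(start + 1, end - overlap)
--     return segments
-- ===== Notes on version B (the rewrite author's own statement) =====
-- stated objective: alternative
-- what changed: B first collects the sorted list of all sentence-boundary positions in one pass, then each segment finds its rightmost break point by a binary search over that index (and the result list is built by cons in a recursive loop) instead of A's per-segment backward character scan.
import Mathlib
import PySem

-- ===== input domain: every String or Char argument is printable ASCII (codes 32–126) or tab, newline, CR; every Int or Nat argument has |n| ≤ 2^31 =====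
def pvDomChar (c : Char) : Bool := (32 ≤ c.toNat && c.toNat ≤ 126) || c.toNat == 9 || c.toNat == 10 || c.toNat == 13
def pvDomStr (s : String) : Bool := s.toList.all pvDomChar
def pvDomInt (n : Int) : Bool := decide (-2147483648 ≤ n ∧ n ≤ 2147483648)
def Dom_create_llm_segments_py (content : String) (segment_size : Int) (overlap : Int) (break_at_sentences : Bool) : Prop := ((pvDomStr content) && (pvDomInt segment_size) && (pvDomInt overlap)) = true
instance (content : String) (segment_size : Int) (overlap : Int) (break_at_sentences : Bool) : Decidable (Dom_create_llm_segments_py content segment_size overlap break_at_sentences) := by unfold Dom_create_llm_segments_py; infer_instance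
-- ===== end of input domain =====

-- B precomputes the sorted list of sentence-boundary positions and replaces A's
-- per-segment backward scan by a binary search over it (objective: alternative).

-- ===== PORT A =====

-- content[i] in '.!?'
def pvPunct (c : Char) : Bool := c == '.' || c == '!' || c == '?'

def pvPunctAt (cs : List Char) (i : Int) : Bool :=
  match PySem.List.pyGet? cs i with
  | some c => pvPunct c
  | none => false

-- the body computing `end`: end = start + segment_size, then the sentence-aware
-- backward scan 'for i in range(search_end - 1, search_start - 1, -1)'
def pvEndA (cs : List Char) (start segment_size : Int) (bas : Bool) : Int :=
  let e0 := start + segment_size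
  if e0 < (cs.length : Int) ∧ bas then
    let ss := max (start + segment_size - 100) start
    let se := min (e0 + 50) (cs.length : Int)
    match (PySem.List.pyRange (se - 1) (ss - 1) (-1)).find? (pvPunctAt cs) with
    | some i => i + 1
    | none => e0
  else e0

-- the while-loop of A (accumulator, as Python appends)
def pvLoopA (cs : List Char) (segment_size overlap : Int) (bas : Bool) (start : Int)
    (acc : List String) : List String :=
  if h : start < (cs.length : Int) then
    let en := pvEndA cs start segment_size bas
    let seg := PySem.Chars.strip (PySem.List.slice cs (some start) (some en))
    let acc' := if seg.isEmpty then acc else acc ++ [String.ofList seg]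
    pvLoopA cs segment_size overlap bas (max (start + 1) (en - overlap)) acc'
  else acc
termination_by ((cs.length : Int) - start).toNat
decreasing_by
  have h1 : start + 1 ≤ max (start + 1) (pvEndA cs start segment_size bas - overlap) :=
    le_max_left _ _
  omega

def create_llm_segments_py (content : String) (segment_size : Int) (overlap : Int) (break_at_sentences : Bool) : List String :=
  if content.toList.isEmpty then []
  else pvLoopA content.toList segment_size overlap break_at_sentences 0 []

-- ===== PORT B =====

-- bounds = [i for i, ch in enumerate(content) if ch in '.!?']
def pvCollect : List Char → Int → List Int
  | [], _ => []
  | c :: rest, i => if pvPunct c then i :: pvCollect rest (i + 1) else pvCollect rest (i + 1)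

-- the hand-written binary search of Source B (bounds[mid] is in range whenever lo < hi ≤ len,
-- so getD's default is never consulted; exact on those calls)
def pvBisect (bounds : List Int) (se : Int) (lo hi : Nat) : Nat :=
  if h : lo < hi then
    let mid := (lo + hi) / 2
    if bounds.getD mid 0 < se then pvBisect bounds se (mid + 1) hi
    else pvBisect bounds se lo mid
  else lo
termination_by hi - lo
decreasing_by all_goals omega

-- seg_end of Source B
def pvEndB (cs : List Char) (bounds : List Int) (start segment_size : Int) (bas : Bool) : Int :=
  let e0 := start + segment_size
  if e0 < (cs.length : Int) ∧ bas then
    let ss := max (e0 - 100) start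
    let se := min (e0 + 50) (cs.length : Int)
    let r := pvBisect bounds se 0 bounds.length
    if 0 < r ∧ ss ≤ bounds.getD (r - 1) 0 then bounds.getD (r - 1) 0 + 1 else e0
  else e0

-- the while-loop of Source B, building the result front-to-back by cons
def pvSegsB (cs : List Char) (bounds : List Int) (segment_size overlap : Int) (bas : Bool)
    (start : Int) : List String :=
  if h : start < (cs.length : Int) then
    let en := pvEndB cs bounds start segment_size bas
    let piece := PySem.Chars.strip (PySem.List.slice cs (some start) (some en))
    let rest := pvSegsB cs bounds segment_size overlap bas (max (start + 1) (en - overlap))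
    if piece.isEmpty then rest else String.ofList piece :: rest
  else []
termination_by ((cs.length : Int) - start).toNat
decreasing_by
  have h1 : start + 1 ≤ max (start + 1) (pvEndB cs bounds start segment_size bas - overlap) :=
    le_max_left _ _
  omega

def create_llm_segments_py_alt (content : String) (segment_size : Int) (overlap : Int) (break_at_sentences : Bool) : List String :=
  pvSegsB content.toList (pvCollect content.toList 0) segment_size overlap break_at_sentences 0

-- ===== PRECONDITION & SPEC =====
def Spec_create_llm_segments_py (content : String) (segment_size : Int) (overlap : Int) (break_at_sentences : Bool) (out : List String) : Prop := out = create_llm_segments_py_alt content segment_size overlap break_at_sentences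
instance (content : String) (segment_size : Int) (overlap : Int) (break_at_sentences : Bool) (out : List String) : Decidable (Spec_create_llm_segments_py content segment_size overlap break_at_sentences out) := by unfold Spec_create_llm_segments_py; infer_instance

-- ===== CLAIM (what is proved, stated in full; the proofs are below) =====
def Claim_equal_create_llm_segments_py : Prop := ∀ (content : String) (segment_size : Int) (overlap : Int) (break_at_sentences : Bool), Dom_create_llm_segments_py content segment_size overlap break_at_sentences → Spec_create_llm_segments_py content segment_size overlap break_at_sentences (create_llm_segments_py content segment_size overlap break_at_sentences)

-- ===== LEMMAS AND PROOFS =====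

-- reference value: the last boundary index ≤ j (or -1)
def pvLastLE (cs : List Char) : Nat → Int
  | 0 => if pvPunctAt cs 0 then 0 else -1
  | j + 1 => if pvPunctAt cs ((j : Int) + 1) then (j : Int) + 1 else pvLastLE cs j

lemma pvLastLE_le (cs : List Char) : ∀ j : Nat, pvLastLE cs j ≤ (j : Int) := by
  intro j
  induction j with
  | zero => simp [pvLastLE]; split <;> omega
  | succ j ih => simp [pvLastLE]; split <;> omega

-- characterisation: a punct position m with nothing punct in (m, j] is pvLastLE
lemma pvLastLE_eq_of (cs : List Char) (m : Int) (hm0 : 0 ≤ m) (hp : pvPunctAt cs m = true) :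
    ∀ j : Nat, m ≤ (j : Int) →
      (∀ k : Int, m < k → k ≤ (j : Int) → pvPunctAt cs k = false) →
      pvLastLE cs j = m := by
  intro j
  induction j with
  | zero =>
    intro hle _
    have : m = 0 := by omega
    subst this
    simp [pvLastLE, hp]
  | succ j ih =>
    intro hle hnone
    by_cases he : m = (j : Int) + 1
    · rw [pvLastLE, ← he, hp]; simp
    · have hlt : m ≤ (j : Int) := by push_cast at hle; omega
      have hnp : pvPunctAt cs ((j : Int) + 1) = false := by
        apply hnone <;> push_cast <;> omega
      rw [pvLastLE, hnp]
      simp only [Bool.false_eq_true, if_false]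
      exact ih hlt (fun k hk1 hk2 => hnone k hk1 (by push_cast; omega))

-- no punct ≤ j ⇒ -1
lemma pvLastLE_none (cs : List Char) :
    ∀ j : Nat, (∀ k : Int, 0 ≤ k → k ≤ (j : Int) → pvPunctAt cs k = false) →
      pvLastLE cs j = -1 := by
  intro j
  induction j with
  | zero => intro h; simp [pvLastLE, h 0 le_rfl le_rfl]
  | succ j ih =>
    intro h
    have hnp : pvPunctAt cs ((j : Int) + 1) = false := by
      apply h <;> push_cast <;> omega
    rw [pvLastLE, hnp]
    simp only [Bool.false_eq_true, if_false]
    exact ih (fun k hk1 hk2 => h k hk1 (by push_cast; omega))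

-- A's backward scan, characterised by pvLastLE
lemma pvScan_eq (cs : List Char) (ss : Int) (hss : 0 ≤ ss) : ∀ j : Nat,
    (PySem.List.pyRange (j : Int) (ss - 1) (-1)).find? (pvPunctAt cs) =
      if ss ≤ pvLastLE cs j then some (pvLastLE cs j) else none := by
  intro j
  induction j with
  | zero =>
    by_cases h1 : ss = 0
    · subst h1
      rw [PySem.List.pyRange_neg_one_cons (by norm_num), PySem.List.pyRange_neg_one_eq_nil (by norm_num)]
      simp only [Nat.cast_zero, List.find?]
      cases hp : pvPunctAt cs 0 <;> simp [pvLastLE, hp]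
    · rw [PySem.List.pyRange_neg_one_eq_nil (by omega)]
      have := pvLastLE_le cs 0
      simp only [List.find?_nil]
      rw [if_neg (by omega)]
  | succ j ih =>
    by_cases h1 : ss ≤ (j : Int) + 1
    · rw [show ((j + 1 : Nat) : Int) = (j : Int) + 1 by push_cast; ring]
      rw [PySem.List.pyRange_neg_one_cons (by omega)]
      simp only [List.find?]
      cases hp : pvPunctAt cs ((j : Int) + 1) with
      | true =>
        simp [pvLastLE, hp, h1]
      | false =>
        simp only [pvLastLE, hp]
        rw [show (j : Int) + 1 - 1 = (j : Int) by ring]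
        simpa using ih
    · rw [PySem.List.pyRange_neg_one_eq_nil (by push_cast; omega)]
      have := pvLastLE_le cs (j + 1)
      simp only [List.find?_nil]
      rw [if_neg (by push_cast at this ⊢; omega)]

-- pvCollect facts
lemma pvCollect_ge (cs : List Char) : ∀ (i : Int) (x : Int), x ∈ pvCollect cs i → i ≤ x := by
  induction cs with
  | nil => intro i x hx; simp [pvCollect] at hx
  | cons c rest ih =>
    intro i x hx
    simp only [pvCollect] at hx
    by_cases hp : pvPunct c = true
    · rw [if_pos hp] at hx
      rcases List.mem_cons.mp hx with h | h
      · omega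
      · have := ih (i + 1) x h; omega
    · rw [if_neg hp] at hx
      have := ih (i + 1) x hx; omega

lemma pvCollect_sorted (cs : List Char) : ∀ i : Int, (pvCollect cs i).Pairwise (· < ·) := by
  induction cs with
  | nil => intro i; simp [pvCollect]
  | cons c rest ih =>
    intro i
    simp only [pvCollect]
    by_cases hp : pvPunct c = true
    · rw [if_pos hp]
      exact List.pairwise_cons.mpr
        ⟨fun x hx => by have := pvCollect_ge rest (i + 1) x hx; omega, ih (i + 1)⟩
    · rw [if_neg hp]; exact ih (i + 1)

lemma pvCollect_mem (cs : List Char) : ∀ (i : Int) (x : Int),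
    x ∈ pvCollect cs i ↔ (i ≤ x ∧ x < i + (cs.length : Int) ∧ pvPunctAt cs (x - i) = true) := by
  induction cs with
  | nil =>
    intro i x
    simp [pvCollect]; omega
  | cons c rest ih =>
    intro i x
    have hshift : ∀ k : Int, 0 < k → pvPunctAt (c :: rest) k = pvPunctAt rest (k - 1) := by
      intro k hk
      have hk1 : (1 : Int) ≤ k := hk
      obtain ⟨m, hm⟩ : ∃ m : Nat, k = (m : Int) + 1 := ⟨(k - 1).toNat, by omega⟩
      subst hm
      simp only [pvPunctAt]
      rw [show (m : Int) + 1 - 1 = (m : Int) by ring]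
      rw [show ((m : Int) + 1) = ((m + 1 : Nat) : Int) by push_cast; ring]
      rw [PySem.List.pyGet?_natCast, PySem.List.pyGet?_natCast]
      simp
    constructor
    · intro hx
      simp only [pvCollect] at hx
      by_cases hp : pvPunct c = true
      · rw [if_pos hp] at hx
        rcases List.mem_cons.mp hx with h | h
        · subst h
          refine ⟨le_rfl, by simp only [List.length_cons]; push_cast; omega, ?_⟩
          simp [pvPunctAt, PySem.List.pyGet?, PySem.List.pyIdx?, hp]
        · have h1 := (ih (i + 1) x).mp h
          have h2 := pvCollect_ge rest (i + 1) x h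
          refine ⟨by omega, by simp; omega, ?_⟩
          rw [hshift (x - i) (by omega)]
          rw [show x - i - 1 = x - (i + 1) by ring]
          exact h1.2.2
      · rw [if_neg hp] at hx
        have h1 := (ih (i + 1) x).mp hx
        have h2 := pvCollect_ge rest (i + 1) x hx
        refine ⟨by omega, by simp; omega, ?_⟩
        rw [hshift (x - i) (by omega)]
        rw [show x - i - 1 = x - (i + 1) by ring]
        exact h1.2.2
    · rintro ⟨h1, h2, h3⟩
      simp only [pvCollect]
      by_cases he : x = i
      · subst he
        simp only [sub_self] at h3
        have hp : pvPunct c = true := by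
          simpa [pvPunctAt, PySem.List.pyGet?, PySem.List.pyIdx?] using h3
        rw [if_pos hp]; exact List.mem_cons_self
      · have hx1 : i + 1 ≤ x := by omega
        rw [hshift (x - i) (by omega)] at h3
        rw [show x - i - 1 = x - (i + 1) by ring] at h3
        have hmem : x ∈ pvCollect rest (i + 1) :=
          (ih (i + 1) x).mpr ⟨hx1, by simp only [List.length_cons] at h2; push_cast at h2 ⊢; omega, h3⟩
        by_cases hp : pvPunct c = true
        · rw [if_pos hp]; exact List.mem_cons_of_mem _ hmem
        · rw [if_neg hp]; exact hmem

-- sorted list: getD is monotone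
lemma pvSorted_getD (b : List Int) (hs : b.Pairwise (· < ·)) (p q : Nat)
    (hpq : p ≤ q) (hq : q < b.length) : b.getD p 0 ≤ b.getD q 0 := by
  rcases Nat.eq_or_lt_of_le hpq with rfl | h
  · exact le_rfl
  · rw [List.getD_eq_getElem b 0 (by omega), List.getD_eq_getElem b 0 hq]
    exact le_of_lt (List.pairwise_iff_getElem.mp hs p q (by omega) hq h)

-- binary-search invariant: pvBisect returns the partition point of (· < se)
lemma pvBisect_inv (b : List Int) (se : Int) (hs : b.Pairwise (· < ·)) :
    ∀ (fuel lo hi : Nat), hi - lo ≤ fuel → lo ≤ hi → hi ≤ b.length →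
      (∀ k, k < lo → b.getD k 0 < se) →
      (∀ k, hi ≤ k → k < b.length → se ≤ b.getD k 0) →
      pvBisect b se lo hi ≤ b.length ∧
      (∀ k, k < pvBisect b se lo hi → b.getD k 0 < se) ∧
      (∀ k, pvBisect b se lo hi ≤ k → k < b.length → se ≤ b.getD k 0) := by
  intro fuel
  induction fuel with
  | zero =>
    intro lo hi hf hlh hhl hlow hhigh
    have hE : lo = hi := by omega
    subst hE
    rw [pvBisect, dif_neg (by omega)]
    exact ⟨hhl, hlow, hhigh⟩
  | succ fuel ih =>
    intro lo hi hf hlh hhl hlow hhigh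
    rw [pvBisect]
    by_cases h : lo < hi
    · rw [dif_pos h]
      have hmid1 : lo ≤ (lo + hi) / 2 := by omega
      have hmid2 : (lo + hi) / 2 < hi := by omega
      by_cases hc : b.getD ((lo + hi) / 2) 0 < se
      · rw [if_pos hc]
        apply ih _ _ (by omega) (by omega) hhl _ hhigh
        intro k hk
        exact lt_of_le_of_lt (pvSorted_getD b hs k ((lo + hi) / 2) (by omega) (by omega)) hc
      · rw [if_neg hc]
        apply ih _ _ (by omega) (by omega) (by omega) hlow
        intro k hk1 hk2
        by_cases hk3 : hi ≤ k
        · exact hhigh k hk3 hk2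
        · exact le_trans (not_lt.mp hc) (pvSorted_getD b hs ((lo + hi) / 2) k hk1 hk2)
    · rw [dif_neg h]
      have hE : lo = hi := by omega
      subst hE
      exact ⟨hhl, hlow, hhigh⟩

-- the two `end` computations agree
lemma pvEnd_eq (cs : List Char) (start segment_size : Int) (bas : Bool) (h0 : 0 ≤ start) :
    pvEndB cs (pvCollect cs 0) start segment_size bas = pvEndA cs start segment_size bas := by
  simp only [pvEndA, pvEndB]
  by_cases hc : start + segment_size < (cs.length : Int) ∧ bas = true
  · rw [if_pos hc, if_pos hc]
    set b := pvCollect cs 0 with hbdef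
    set ss := max (start + segment_size - 100) start with hssdef
    set se := min (start + segment_size + 50) (cs.length : Int) with hsedef
    have hss0 : 0 ≤ ss := le_trans h0 (le_max_right _ _)
    have hsele : se ≤ (cs.length : Int) := min_le_right _ _
    have hmemb : ∀ x : Int, x ∈ b ↔ (0 ≤ x ∧ x < (cs.length : Int) ∧ pvPunctAt cs x = true) := by
      intro x
      rw [hbdef, pvCollect_mem cs 0 x]
      constructor
      · rintro ⟨h1, h2, h3⟩; rw [show x - 0 = x by ring] at h3; exact ⟨h1, by omega, h3⟩
      · rintro ⟨h1, h2, h3⟩; exact ⟨h1, by omega, by rw [show x - 0 = x by ring]; exact h3⟩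
    obtain ⟨hr_le, hr_lo, hr_hi⟩ :=
      pvBisect_inv b se (pvCollect_sorted cs 0) b.length 0 b.length (by omega) (by omega)
        le_rfl (by omega) (by omega)
    set r := pvBisect b se 0 b.length with hrdef
    by_cases hr : 0 < r
    · -- candidate m = bounds[r-1], the largest boundary < se
      set m := b.getD (r - 1) 0 with hmdef
      have hmlt : m < se := hr_lo (r - 1) (by omega)
      have hmmem : m ∈ b := by
        rw [hmdef, List.getD_eq_getElem b 0 (by omega)]
        exact List.getElem_mem _
      obtain ⟨hm0, hmlen, hmp⟩ := (hmemb m).mp hmmem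
      have hse1 : 1 ≤ se := by omega
      have hj : ((se - 1).toNat : Int) = se - 1 := by omega
      have hlast : pvLastLE cs (se - 1).toNat = m := by
        apply pvLastLE_eq_of cs m hm0 hmp _ (by omega)
        intro k hk1 hk2
        by_contra hkp
        rw [Bool.not_eq_false] at hkp
        have hkmem : k ∈ b := (hmemb k).mpr ⟨by omega, by omega, hkp⟩
        obtain ⟨idx, hidx, hval⟩ := List.getElem_of_mem hkmem
        have hvalD : b.getD idx 0 = k := by rw [List.getD_eq_getElem b 0 hidx, hval]
        by_cases hidxr : r ≤ idx
        · have := hr_hi idx hidxr hidx; omega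
        · have : b.getD idx 0 ≤ m := pvSorted_getD b (pvCollect_sorted cs 0) idx (r - 1)
            (by omega) (by omega)
          omega
      rw [← hj, pvScan_eq cs ss hss0 ((se - 1).toNat), hlast]
      by_cases hssm : ss ≤ m
      · rw [if_pos ⟨hr, hssm⟩, if_pos hssm]
      · rw [if_neg (fun h => hssm h.2), if_neg hssm]
    · -- r = 0: no boundary < se at all
      rw [if_neg (by omega)]
      have hnone : ∀ k : Int, 0 ≤ k → k < se → pvPunctAt cs k = false := by
        intro k hk1 hk2
        by_contra hkp
        rw [Bool.not_eq_false] at hkp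
        have hkmem : k ∈ b := (hmemb k).mpr ⟨hk1, by omega, hkp⟩
        obtain ⟨idx, hidx, hval⟩ := List.getElem_of_mem hkmem
        have := hr_hi idx (by omega) hidx
        rw [List.getD_eq_getElem b 0 hidx, hval] at this
        omega
      by_cases hse0 : se ≤ 0
      · rw [PySem.List.pyRange_neg_one_eq_nil (by omega)]
        simp
      · have hj : ((se - 1).toNat : Int) = se - 1 := by omega
        rw [← hj, pvScan_eq cs ss hss0 ((se - 1).toNat)]
        have : pvLastLE cs (se - 1).toNat = -1 :=
          pvLastLE_none cs _ (fun k hk1 hk2 => hnone k hk1 (by omega))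
        rw [this, if_neg (by omega)]
  · rw [if_neg hc, if_neg hc]

lemma pvLoop_eq (cs : List Char) (segment_size overlap : Int) (bas : Bool) :
    ∀ (n : Nat) (start : Int) (acc : List String),
      ((cs.length : Int) - start).toNat ≤ n → 0 ≤ start →
      pvLoopA cs segment_size overlap bas start acc =
        acc ++ pvSegsB cs (pvCollect cs 0) segment_size overlap bas start := by
  intro n
  induction n with
  | zero =>
    intro start acc hn h0
    rw [pvLoopA, pvSegsB]
    rw [dif_neg (by omega), dif_neg (by omega)]
    simp
  | succ n ih =>
    intro start acc hn h0
    rw [pvLoopA, pvSegsB]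
    by_cases h : start < (cs.length : Int)
    · rw [dif_pos h, dif_pos h]
      rw [pvEnd_eq cs start segment_size bas h0]
      have hmax : start + 1 ≤ max (start + 1) (pvEndA cs start segment_size bas - overlap) :=
        le_max_left _ _
      rw [ih _ _ (by omega) (by omega)]
      by_cases hs : (PySem.Chars.strip (PySem.List.slice cs (some start)
          (some (pvEndA cs start segment_size bas)))).isEmpty
      · rw [if_pos hs, if_pos hs]
      · rw [if_neg hs, if_neg hs]
        simp
    · rw [dif_neg h, dif_neg h]
      simp

-- ===== VERDICT (by name: the statement is the Claim_ definition above) =====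
theorem create_llm_segments_py_spec : Claim_equal_create_llm_segments_py := by
  intro content segment_size overlap bas _
  unfold Spec_create_llm_segments_py create_llm_segments_py create_llm_segments_py_alt
  by_cases h : content.toList.isEmpty
  · rw [if_pos h]
    have : content.toList = [] := List.isEmpty_iff.mp h
    rw [this]
    rw [pvSegsB]
    simp
  · rw [if_neg h]
    exact pvLoop_eq content.toList segment_size overlap bas content.toList.length 0 []
      (by omega) le_rfl
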